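-- pv_equiv track=rewrite | github.com/MeAndTheFirefly/data_mining | statistics_course/02/frequency_distribution.py | cal_mo_th
-- ===== SOURCE A (Python) =====
-- data = \
-- [87, 51, 56, 59, 90, 67, 74, 96, 73, 80,
--  92, 68, 92, 79, 95, 68, 87, 93, 91, 80,
--  65, 92, 77, 94, 89, 74, 96, 85, 93, 72,
--  49, 79, 65, 62, 70, 76, 87, 74, 63, 94,
--  86, 86, 69, 88, 89, 97, 91, 54, 83, 73]
--
-- def cal_mo_th(fre):
--     init = 0
--     length = len(data)
--     res = []
--     for e in fre:
--         length -= init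
--         res.append(length)
--         init = e
--     return res
-- ===== SOURCE B (Python) =====
-- data = \
-- [87, 51, 56, 59, 90, 67, 74, 96, 73, 80,
--  92, 68, 92, 79, 95, 68, 87, 93, 91, 80,
--  65, 92, 77, 94, 89, 74, 96, 85, 93, 72,
--  49, 79, 65, 62, 70, 76, 87, 74, 63, 94,
--  86, 86, 69, 88, 89, 97, 91, 54, 83, 73]
--
-- def cal_mo_th(fre):
--     # two passes: precompute the prefix-sum table of fre, then map it
--     prefixes = [0]
--     total = 0
--     for e in fre:
--         total += e
--         prefixes.append(total)
--     return [len(data) - p for p in prefixes[:-1]]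
-- ===== Notes on version B (the rewrite author's own statement) =====
-- stated objective: alternative
-- what changed: Replaced A's single stateful loop with a lagged accumulator (init/length mutated in place) by a two-phase decomposition: build the prefix-sum table of fre first, then produce the result as a separate map len(data) - p over that table minus its last entry.
import Mathlib
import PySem

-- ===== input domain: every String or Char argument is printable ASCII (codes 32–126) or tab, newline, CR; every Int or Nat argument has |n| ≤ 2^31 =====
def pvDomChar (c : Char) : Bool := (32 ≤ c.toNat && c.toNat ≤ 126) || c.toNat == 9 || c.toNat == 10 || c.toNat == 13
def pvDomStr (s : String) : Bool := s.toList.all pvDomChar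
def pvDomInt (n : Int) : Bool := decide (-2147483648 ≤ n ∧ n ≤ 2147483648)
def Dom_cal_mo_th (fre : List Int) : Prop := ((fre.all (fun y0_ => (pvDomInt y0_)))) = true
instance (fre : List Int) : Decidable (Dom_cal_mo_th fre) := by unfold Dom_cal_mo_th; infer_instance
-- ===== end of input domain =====

-- B replaces A's single stateful loop (lagged init/length accumulators) by a two-phase
-- decomposition: precompute the prefix-sum table of fre, then map 50 - p over it.

-- ===== PORT A =====
-- loop state: (init, length, res); len(data) = 50 for the module's fixed data list
def cal_mo_th (fre : List Int) : List Int :=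
  (fre.foldl
    (fun (st : Int × Int × List Int) e =>
      let length := st.2.1 - st.1
      (e, length, st.2.2 ++ [length]))
    (0, 50, [])).2.2

-- ===== PORT B =====
-- phase 1: prefix-sum table (loop state (prefixes, total)); phase 2: map over prefixes[:-1]
def cal_mo_th_alt (fre : List Int) : List Int :=
  let prefixes :=
    (fre.foldl
      (fun (st : List Int × Int) e => (st.1 ++ [st.2 + e], st.2 + e))
      ([0], 0)).1
  prefixes.dropLast.map (fun p => 50 - p)

-- ===== PRECONDITION & SPEC =====
def Spec_cal_mo_th (fre : List Int) (out : List Int) : Prop := out = cal_mo_th_alt fre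
instance (fre : List Int) (out : List Int) : Decidable (Spec_cal_mo_th fre out) := by unfold Spec_cal_mo_th; infer_instance

-- ===== CLAIM (what is proved, stated in full; the proofs are below) =====
def Claim_equal_cal_mo_th : Prop := ∀ (fre : List Int), Dom_cal_mo_th fre → Spec_cal_mo_th fre (cal_mo_th fre)

-- ===== LEMMAS AND PROOFS =====

-- A's loop computes, after any prefix already consumed, 50 minus each proper prefix sum.
theorem cal_mo_th_fold_general (fre : List Int) :
    ∀ (init length : Int) (res : List Int),
      (fre.foldl
        (fun (st : Int × Int × List Int) e =>
          let l := st.2.1 - st.1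
          (e, l, st.2.2 ++ [l]))
        (init, length, res)).2.2
      = res ++ (List.range fre.length).map (fun i => length - init - (fre.take i).sum) := by
  induction fre with
  | nil => intro init length res; simp
  | cons e rest ih =>
    intro init length res
    simp only [List.foldl_cons]
    rw [ih]
    simp only [List.length_cons, List.range_succ_eq_map, List.map_cons, List.map_map,
      List.append_assoc, List.take_zero, List.sum_nil, sub_zero, List.cons_append,
      List.nil_append]
    congr 2
    refine List.map_congr_left ?_
    intro a _
    simp only [Function.comp_apply, List.take_succ_cons, List.sum_cons]
    ring

-- B's first loop builds exactly the table of prefix sums shifted by the running total.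
theorem cal_mo_th_alt_fold_general (fre : List Int) :
    ∀ (total : Int) (acc : List Int),
      (fre.foldl
        (fun (st : List Int × Int) e => (st.1 ++ [st.2 + e], st.2 + e))
        (acc, total)).1
      = acc ++ (List.range fre.length).map (fun i => total + (fre.take (i + 1)).sum) := by
  induction fre with
  | nil => intro total acc; simp
  | cons e rest ih =>
    intro total acc
    simp only [List.foldl_cons]
    rw [ih]
    simp only [List.length_cons, List.range_succ_eq_map, List.map_cons, List.map_map,
      List.append_assoc, List.take_succ_cons, List.take_zero, List.sum_nil, List.sum_cons,
      add_zero, List.cons_append, List.nil_append]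
    congr 2
    refine List.map_congr_left ?_
    intro a _
    simp only [Function.comp_apply]
    ring

theorem cal_mo_th_alt_closed (fre : List Int) :
    cal_mo_th_alt fre = (List.range fre.length).map (fun i => 50 - (fre.take i).sum) := by
  unfold cal_mo_th_alt
  rw [cal_mo_th_alt_fold_general]
  have hpre : ([0] : List Int) ++ (List.range fre.length).map
      (fun i => 0 + (fre.take (i + 1)).sum)
      = (List.range (fre.length + 1)).map (fun i => (fre.take i).sum) := by
    simp only [List.range_succ_eq_map, List.map_cons, List.map_map, List.take_zero,
      List.sum_nil, zero_add, List.cons_append, List.nil_append]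
    rfl
  rw [hpre, List.range_succ, List.map_append, List.map_cons, List.map_nil]
  simp [List.map_map]

-- ===== VERDICT (by name: the statement is the Claim_ definition above) =====
theorem cal_mo_th_spec : Claim_equal_cal_mo_th := by
  intro fre _
  unfold Spec_cal_mo_th
  rw [cal_mo_th_alt_closed]
  unfold cal_mo_th
  rw [cal_mo_th_fold_general]
  simp
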